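-- pv_equiv track=rewrite | github.com/RiaLeee/programmers | 프로그래머스/0/181916. 주사위 게임 3/주사위 게임 3.py | solution
-- ===== SOURCE A (Python) =====
-- def solution(a, b, c, d):
--     dice = [a,b,c,d]
--     counts = [0]*7
--
--     for num in dice:
--         counts[num] += 1
--
--     for i in range(1,7):
--         if counts[i]==4 :
--             return 1111*i
--
--     for i in range(1,7):
--         for j in range(1,7):
--             if counts[i]==3 and counts[j]==1 and i != j:
--                 return (10*i+j) **2
--             elif counts[i]==2 and counts[j]==2 and i != j:
--                 return (i+j)*abs(i-j)
--
--
--     for i in range(1,7):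
--         for j in range(1,7):
--             for r in range(1,7):
--                 if counts[i]==2 and counts[j]==1 and counts[r]==1 and j != r:
--                     return j*r
--
--
--     return min(dice)
-- ===== SOURCE B (Python) =====
-- def solution(a, b, c, d):
--     dice = [a, b, c, d]
--     counts = [0] * 7
--     for num in dice:
--         counts[num] += 1
--     quads = [f for f in range(1, 7) if counts[f] == 4]
--     triples = [f for f in range(1, 7) if counts[f] == 3]
--     pairs = [f for f in range(1, 7) if counts[f] == 2]
--     singles = [f for f in range(1, 7) if counts[f] == 1]
--     if quads:
--         return 1111 * quads[0]
--     if triples and singles: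
--         return (10 * triples[0] + singles[0]) ** 2
--     if len(pairs) == 2:
--         p, q = pairs
--         return (p + q) * abs(p - q)
--     if pairs and len(singles) == 2:
--         return singles[0] * singles[1]
--     return min(dice)
-- ===== Notes on version B (the rewrite author's own statement) =====
-- stated objective: simpler
-- what changed: Replaces A's early-return scans over the 6x6 and 6x6x6 face grids by a direct frequency classification: the faces of each frequency are collected once and the branch is chosen by the shape of that frequency multiset.
import Mathlib
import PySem

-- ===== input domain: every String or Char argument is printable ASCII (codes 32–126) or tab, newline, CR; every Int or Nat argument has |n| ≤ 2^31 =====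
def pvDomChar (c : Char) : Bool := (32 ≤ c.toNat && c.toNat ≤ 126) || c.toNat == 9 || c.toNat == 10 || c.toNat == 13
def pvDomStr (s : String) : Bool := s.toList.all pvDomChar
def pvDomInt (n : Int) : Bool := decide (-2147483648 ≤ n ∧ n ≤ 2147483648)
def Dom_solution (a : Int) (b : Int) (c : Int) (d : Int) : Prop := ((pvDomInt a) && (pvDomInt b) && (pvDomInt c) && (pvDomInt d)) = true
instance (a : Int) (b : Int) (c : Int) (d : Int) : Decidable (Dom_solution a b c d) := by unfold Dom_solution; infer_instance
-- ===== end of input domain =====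

-- B replaces A's early-return scans over the 6x6 and 6x6x6 face grids by a direct classification
-- of the face-frequency shape (objective: simpler); the counting loop (and hence its IndexError
-- domain, including Python's negative-index wraparound) is shared verbatim.

-- ===== PORT A =====
-- counts[num] += 1 over dice (identical loop in both Pythons; pySetD/pyGetD are exact incl. negative indices, total under Pre_)
def pvStep (cs : List Int) (num : Int) : List Int :=
  PySem.List.pySetD cs num (PySem.List.pyGetD cs num 0 + 1)

def pvDiceCounts (dice : List Int) : List Int :=
  dice.foldl pvStep (List.replicate 7 0)

-- 'for i in range(1,7): if counts[i]==4: return 1111*i'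
def pvLoop1 (counts : List Int) : Option Int :=
  (PySem.List.pyRange 1 7 1).findSome? fun i =>
    if PySem.List.pyGetD counts i 0 = 4 then some (1111 * i) else none

-- the nested 'for i … for j …' loop with its two returns, in branch order
def pvLoop23 (counts : List Int) : Option Int :=
  (PySem.List.pyRange 1 7 1).findSome? fun i =>
    (PySem.List.pyRange 1 7 1).findSome? fun j =>
      if PySem.List.pyGetD counts i 0 = 3 ∧ PySem.List.pyGetD counts j 0 = 1 ∧ i ≠ j then
        some ((10 * i + j) ^ 2)
      else if PySem.List.pyGetD counts i 0 = 2 ∧ PySem.List.pyGetD counts j 0 = 2 ∧ i ≠ j then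
        some ((i + j) * |i - j|)
      else none

-- the triple 'for i … for j … for r …' loop
def pvLoop4 (counts : List Int) : Option Int :=
  (PySem.List.pyRange 1 7 1).findSome? fun i =>
    (PySem.List.pyRange 1 7 1).findSome? fun j =>
      (PySem.List.pyRange 1 7 1).findSome? fun r =>
        if PySem.List.pyGetD counts i 0 = 2 ∧ PySem.List.pyGetD counts j 0 = 1 ∧
           PySem.List.pyGetD counts r 0 = 1 ∧ j ≠ r then some (j * r) else none

def solution (a : Int) (b : Int) (c : Int) (d : Int) : Int :=
  let dice : List Int := [a, b, c, d]
  let counts := pvDiceCounts dice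
  match pvLoop1 counts with
  | some v => v
  | none =>
    match pvLoop23 counts with
    | some v => v
    | none =>
      match pvLoop4 counts with
      | some v => v
      | none => (PySem.List.min? dice (fun x => x)).getD 0   -- min(dice), dice nonempty

-- ===== PORT B =====
-- faces of a given frequency, in face order: '[f for f in range(1,7) if counts[f] == k]'
def pvFacesWith (counts : List Int) (k : Int) : List Int :=
  (PySem.List.pyRange 1 7 1).filter fun f => PySem.List.pyGetD counts f 0 == k

def solution_alt (a : Int) (b : Int) (c : Int) (d : Int) : Int :=
  let dice : List Int := [a, b, c, d]
  let counts := pvDiceCounts dice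
  let quads := pvFacesWith counts 4
  let triples := pvFacesWith counts 3
  let pairs := pvFacesWith counts 2
  let singles := pvFacesWith counts 1
  match quads with
  | q :: _ => 1111 * q
  | [] =>
    match triples, singles with
    | t :: _, s :: _ => (10 * t + s) ^ 2
    | _, _ =>
      match pairs with
      | [p, q] => (p + q) * |p - q|
      | _ =>
        match pairs, singles with
        | _ :: _, [s1, s2] => s1 * s2
        | _, _ => (PySem.List.min? dice (fun x => x)).getD 0   -- min(dice)

-- ===== PRECONDITION & SPEC =====
-- Exactly the inputs on which the Python A returns: each die must be a valid (possibly negative)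
-- index into the 7-element counts list, i.e. lie in -7..6; outside, counts[num] raises IndexError.
def Pre_solution (a : Int) (b : Int) (c : Int) (d : Int) : Prop :=
  (-7 ≤ a ∧ a ≤ 6) ∧ (-7 ≤ b ∧ b ≤ 6) ∧ (-7 ≤ c ∧ c ≤ 6) ∧ (-7 ≤ d ∧ d ≤ 6)
instance (a : Int) (b : Int) (c : Int) (d : Int) : Decidable (Pre_solution a b c d) := by
  unfold Pre_solution; infer_instance

def pvWitness_solution : Int × Int × Int × Int := (2, 3, 2, 3)

def Spec_solution (a : Int) (b : Int) (c : Int) (d : Int) (out : Int) : Prop := out = solution_alt a b c d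
instance (a : Int) (b : Int) (c : Int) (d : Int) (out : Int) : Decidable (Spec_solution a b c d out) := by
  unfold Spec_solution; infer_instance

-- ===== CLAIM (what is proved, stated in full; the proofs are below) =====
def Claim_equal_solution : Prop := ∀ (a : Int) (b : Int) (c : Int) (d : Int), Dom_solution a b c d → Pre_solution a b c d → Spec_solution a b c d (solution a b c d)

-- ===== LEMMAS AND PROOFS =====

-- A's result after the counting loop, as a function of counts and the min(dice) fallback
def pvAfterA (cs : List Int) (m : Int) : Int :=
  match pvLoop1 cs with
  | some v => v
  | none =>
    match pvLoop23 cs with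
    | some v => v
    | none =>
      match pvLoop4 cs with
      | some v => v
      | none => m

-- B's result after the counting loop
def pvAfterB (cs : List Int) (m : Int) : Int :=
  match pvFacesWith cs 4 with
  | q :: _ => 1111 * q
  | [] =>
    match pvFacesWith cs 3, pvFacesWith cs 1 with
    | t :: _, s :: _ => (10 * t + s) ^ 2
    | _, _ =>
      match pvFacesWith cs 2 with
      | [p, q] => (p + q) * |p - q|
      | _ =>
        match pvFacesWith cs 2, pvFacesWith cs 1 with
        | _ :: _, [s1, s2] => s1 * s2
        | _, _ => m

-- the selections as Options (none = fall through to min(dice))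
def pvSelA (cs : List Int) : Option Int :=
  (pvLoop1 cs).orElse fun _ => (pvLoop23 cs).orElse fun _ => pvLoop4 cs

def pvSelB (cs : List Int) : Option Int :=
  match pvFacesWith cs 4 with
  | q :: _ => some (1111 * q)
  | [] =>
    match pvFacesWith cs 3, pvFacesWith cs 1 with
    | t :: _, s :: _ => some ((10 * t + s) ^ 2)
    | _, _ =>
      match pvFacesWith cs 2 with
      | [p, q] => some ((p + q) * |p - q|)
      | _ =>
        match pvFacesWith cs 2, pvFacesWith cs 1 with
        | _ :: _, [s1, s2] => some (s1 * s2)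
        | _, _ => none

lemma pvAfterA_eq_getD (cs : List Int) (m : Int) : pvAfterA cs m = (pvSelA cs).getD m := by
  unfold pvAfterA pvSelA
  repeat' split
  all_goals simp_all [Option.orElse]

lemma pvAfterB_eq_getD (cs : List Int) (m : Int) : pvAfterB cs m = (pvSelB cs).getD m := by
  unfold pvAfterB pvSelB
  repeat' split
  all_goals simp_all

-- exhaustive check: on every 7-slot count vector of 4 dice the two selections agree
def pvChk : Bool :=
  (List.range 5).all fun n0 => (List.range 5).all fun n1 => (List.range 5).all fun n2 =>
  (List.range 5).all fun n3 => (List.range 5).all fun n4 => (List.range 5).all fun n5 =>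
  (List.range 5).all fun n6 =>
    if n0 + n1 + n2 + n3 + n4 + n5 + n6 = 4 then
      decide (pvSelA [(n0 : Int), n1, n2, n3, n4, n5, n6] = pvSelB [(n0 : Int), n1, n2, n3, n4, n5, n6])
    else true

set_option maxHeartbeats 4000000 in
lemma pvChk_true : pvChk = true := by decide

lemma pvSel_eq (n0 n1 n2 n3 n4 n5 n6 : ℕ) (h : n0 + n1 + n2 + n3 + n4 + n5 + n6 = 4) :
    pvSelA [(n0 : Int), n1, n2, n3, n4, n5, n6] = pvSelB [(n0 : Int), n1, n2, n3, n4, n5, n6] := by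
  have hc := pvChk_true
  unfold pvChk at hc
  simp only [List.all_eq_true, List.mem_range] at hc
  have := hc n0 (by omega) n1 (by omega) n2 (by omega) n3 (by omega) n4 (by omega)
    n5 (by omega) n6 (by omega)
  rw [if_pos h] at this
  exact of_decide_eq_true this

-- one counting step keeps counts a 7-vector of naturals and adds one to the total
lemma pvStep_good (n0 n1 n2 n3 n4 n5 n6 : ℕ) (i : Int) (h1 : -7 ≤ i) (h2 : i ≤ 6) :
    ∃ m0 m1 m2 m3 m4 m5 m6 : ℕ,
      pvStep [(n0 : Int), n1, n2, n3, n4, n5, n6] i = [(m0 : Int), m1, m2, m3, m4, m5, m6] ∧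
      m0 + m1 + m2 + m3 + m4 + m5 + m6 = n0 + n1 + n2 + n3 + n4 + n5 + n6 + 1 := by
  interval_cases i
  · exact ⟨n0 + 1, n1, n2, n3, n4, n5, n6, by
      simp [pvStep, PySem.List.pySetD, PySem.List.pySet?, PySem.List.pyGetD,
        PySem.List.pyGet?, PySem.List.pyIdx?], by omega⟩
  · exact ⟨n0, n1 + 1, n2, n3, n4, n5, n6, by
      simp [pvStep, PySem.List.pySetD, PySem.List.pySet?, PySem.List.pyGetD,
        PySem.List.pyGet?, PySem.List.pyIdx?], by omega⟩
  · exact ⟨n0, n1, n2 + 1, n3, n4, n5, n6, by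
      simp [pvStep, PySem.List.pySetD, PySem.List.pySet?, PySem.List.pyGetD,
        PySem.List.pyGet?, PySem.List.pyIdx?], by omega⟩
  · exact ⟨n0, n1, n2, n3 + 1, n4, n5, n6, by
      simp [pvStep, PySem.List.pySetD, PySem.List.pySet?, PySem.List.pyGetD,
        PySem.List.pyGet?, PySem.List.pyIdx?], by omega⟩
  · exact ⟨n0, n1, n2, n3, n4 + 1, n5, n6, by
      simp [pvStep, PySem.List.pySetD, PySem.List.pySet?, PySem.List.pyGetD,
        PySem.List.pyGet?, PySem.List.pyIdx?], by omega⟩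
  · exact ⟨n0, n1, n2, n3, n4, n5 + 1, n6, by
      simp [pvStep, PySem.List.pySetD, PySem.List.pySet?, PySem.List.pyGetD,
        PySem.List.pyGet?, PySem.List.pyIdx?], by omega⟩
  · exact ⟨n0, n1, n2, n3, n4, n5, n6 + 1, by
      simp [pvStep, PySem.List.pySetD, PySem.List.pySet?, PySem.List.pyGetD,
        PySem.List.pyGet?, PySem.List.pyIdx?], by omega⟩
  · exact ⟨n0 + 1, n1, n2, n3, n4, n5, n6, by
      simp [pvStep, PySem.List.pySetD, PySem.List.pySet?, PySem.List.pyGetD,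
        PySem.List.pyGet?, PySem.List.pyIdx?], by omega⟩
  · exact ⟨n0, n1 + 1, n2, n3, n4, n5, n6, by
      simp [pvStep, PySem.List.pySetD, PySem.List.pySet?, PySem.List.pyGetD,
        PySem.List.pyGet?, PySem.List.pyIdx?], by omega⟩
  · exact ⟨n0, n1, n2 + 1, n3, n4, n5, n6, by
      simp [pvStep, PySem.List.pySetD, PySem.List.pySet?, PySem.List.pyGetD,
        PySem.List.pyGet?, PySem.List.pyIdx?], by omega⟩
  · exact ⟨n0, n1, n2, n3 + 1, n4, n5, n6, by
      simp [pvStep, PySem.List.pySetD, PySem.List.pySet?, PySem.List.pyGetD,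
        PySem.List.pyGet?, PySem.List.pyIdx?], by omega⟩
  · exact ⟨n0, n1, n2, n3, n4 + 1, n5, n6, by
      simp [pvStep, PySem.List.pySetD, PySem.List.pySet?, PySem.List.pyGetD,
        PySem.List.pyGet?, PySem.List.pyIdx?], by omega⟩
  · exact ⟨n0, n1, n2, n3, n4, n5 + 1, n6, by
      simp [pvStep, PySem.List.pySetD, PySem.List.pySet?, PySem.List.pyGetD,
        PySem.List.pyGet?, PySem.List.pyIdx?], by omega⟩
  · exact ⟨n0, n1, n2, n3, n4, n5, n6 + 1, by
      simp [pvStep, PySem.List.pySetD, PySem.List.pySet?, PySem.List.pyGetD,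
        PySem.List.pyGet?, PySem.List.pyIdx?], by omega⟩

-- counts of [a,b,c,d] is a 7-vector of naturals summing to 4
lemma pvCounts_good (a b c d : Int) (hp : Pre_solution a b c d) :
    ∃ n0 n1 n2 n3 n4 n5 n6 : ℕ,
      pvDiceCounts [a, b, c, d] = [(n0 : Int), n1, n2, n3, n4, n5, n6] ∧
      n0 + n1 + n2 + n3 + n4 + n5 + n6 = 4 := by
  obtain ⟨⟨ha1, ha2⟩, ⟨hb1, hb2⟩, ⟨hc1, hc2⟩, ⟨hd1, hd2⟩⟩ := hp
  have h0 : pvDiceCounts [a, b, c, d] =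
      pvStep (pvStep (pvStep (pvStep [(0:Int),0,0,0,0,0,0] a) b) c) d := rfl
  obtain ⟨a0,a1,a2,a3,a4,a5,a6, hA, hAs⟩ :=
    pvStep_good 0 0 0 0 0 0 0 a ha1 ha2
  obtain ⟨b0,b1,b2,b3,b4,b5,b6, hB, hBs⟩ :=
    pvStep_good a0 a1 a2 a3 a4 a5 a6 b hb1 hb2
  obtain ⟨c0,c1,c2,c3,c4,c5,c6, hC, hCs⟩ :=
    pvStep_good b0 b1 b2 b3 b4 b5 b6 c hc1 hc2
  obtain ⟨d0,d1,d2,d3,d4,d5,d6, hD, hDs⟩ :=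
    pvStep_good c0 c1 c2 c3 c4 c5 c6 d hd1 hd2
  refine ⟨d0,d1,d2,d3,d4,d5,d6, ?_, by omega⟩
  rw [h0]
  norm_num at hA
  rw [hA, hB, hC, hD]

-- ===== VERDICT (by name: the statement is the Claim_ definition above) =====
theorem solution_spec : Claim_equal_solution := by
  intro a b c d _ hpre
  unfold Spec_solution
  obtain ⟨n0,n1,n2,n3,n4,n5,n6, hcnt, hsum⟩ := pvCounts_good a b c d hpre
  have hA : solution a b c d =
      pvAfterA (pvDiceCounts [a, b, c, d]) ((PySem.List.min? [a,b,c,d] (fun x => x)).getD 0) := rfl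
  have hB : solution_alt a b c d =
      pvAfterB (pvDiceCounts [a, b, c, d]) ((PySem.List.min? [a,b,c,d] (fun x => x)).getD 0) := rfl
  rw [hA, hB, hcnt, pvAfterA_eq_getD, pvAfterB_eq_getD, pvSel_eq n0 n1 n2 n3 n4 n5 n6 hsum]
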